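-- pv_equiv track=rewrite | github.com/youngyanni/Individual-task | main.py | ticks_minimal
-- ===== SOURCE A (Python) =====
-- def ticks_minimal(array, h):
--     new_array = []
--     i = 0
--     k = 0
--     while (500000 > int(h) * i and k < len(array)):
--         if (int(h) * i < array[k][0]):
--             new_array.append(array[k][1])
--             i += 1
--         else:
--             new_array.append(array[k][1])
--             k += 1
--             i += 1
--     return new_array
-- ===== SOURCE B (Python) =====
-- def ticks_minimal(array, h):
--     if not array:
--         return []
--     H = int(h)
--     limit = -(-500000 // H)  # first i with H*i >= 500000
--     res = []
--     i = 0
--     for a0, a1 in array: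
--         if i >= limit:
--             break
--         t = min(max(i, -(-a0 // H)), limit - 1)  # last step index spent at this segment
--         res.extend([a1] * (t - i + 1))
--         i = t + 1
--     return res
-- ===== Notes on version B (the rewrite author's own statement) =====
-- stated objective: alternative
-- what changed: Instead of A's per-tick two-pointer while loop that appends one element per step, B computes for each segment the last tick index it occupies in closed form by ceiling division (t = min(max(i, ceil(a0/H)), limit-1) with limit = ceil(500000/H)) and emits the whole run at once with list multiplication, so there is no per-tick comparison loop at all.
-- outside the precondition, e.g. on ticks_minimal([(-1, 5)], 0): A returns [5], B raises ZeroDivisionError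
import Mathlib
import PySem

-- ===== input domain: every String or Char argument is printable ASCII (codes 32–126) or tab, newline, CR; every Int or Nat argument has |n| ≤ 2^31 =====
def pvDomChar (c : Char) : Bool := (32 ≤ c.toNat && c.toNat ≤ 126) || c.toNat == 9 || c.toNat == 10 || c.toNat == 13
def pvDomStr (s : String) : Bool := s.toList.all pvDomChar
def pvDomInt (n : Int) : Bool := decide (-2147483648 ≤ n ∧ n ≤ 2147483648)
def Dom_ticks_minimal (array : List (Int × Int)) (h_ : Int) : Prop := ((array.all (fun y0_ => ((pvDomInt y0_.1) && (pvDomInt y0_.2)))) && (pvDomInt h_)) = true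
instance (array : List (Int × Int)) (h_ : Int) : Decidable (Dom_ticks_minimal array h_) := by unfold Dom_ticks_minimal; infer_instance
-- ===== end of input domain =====

-- ===== PORT A =====
-- B replaces A's per-tick two-pointer while loop by a per-segment pass that computes
-- each segment's last tick index in closed form (ceiling division) and emits the whole
-- run at once; equal output on Pre_.
-- loopA: literal transliteration of A's while loop over state (new_array, i, k);
-- the fuel only makes the loop total (≤ 500000 iterations suffice whenever h_ ≥ 1).
def loopA (array : List (Int × Int)) (h_ : Int) : Nat → List Int → Int → Nat → List Int
  | 0, acc, _, _ => acc
  | fuel+1, acc, i, k =>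
    if 500000 > h_ * i ∧ k < array.length then
      match array[k]? with
      | some p =>
        if h_ * i < p.1 then loopA array h_ fuel (acc ++ [p.2]) (i+1) k
        else loopA array h_ fuel (acc ++ [p.2]) (i+1) (k+1)
      | none => acc
    else acc

def ticks_minimal (array : List (Int × Int)) (h_ : Int) : List Int :=
  loopA array h_ 500001 [] 0 0

-- ===== PORT B =====
-- altLoop: Source B's for-loop over the segments; `limit = -(-500000 // H)` is the first
-- tick index past the 500000 cap, `t` the last tick index spent at the current segment,
-- and the whole run [a1] * (t - i + 1) is emitted at once.
def altLoop (h_ limit : Int) : List (Int × Int) → List Int → Int → List Int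
  | [], res, _ => res
  | (a0, a1) :: rest, res, i =>
    if limit ≤ i then res
    else
      let t := min (max i (-(PySem.Int.floordiv (-a0) h_))) (limit - 1)
      altLoop h_ limit rest (res ++ List.replicate (t - i + 1).toNat a1) (t + 1)

def ticks_minimal_alt (array : List (Int × Int)) (h_ : Int) : List Int :=
  match array with
  | [] => []
  | _ => altLoop h_ (-(PySem.Int.floordiv (-(500000 : Int)) h_)) array [] 0

-- ===== PRECONDITION & SPEC =====
-- Pre_ excludes h_ ≤ 0 with a nonempty array: there A's while loop fails to terminate
-- on most inputs (h_*i never reaches 500000), and on the few such inputs where A does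
-- return, B raises ZeroDivisionError (h_=0) or computes with a wrong-signed ceiling.
def Pre_ticks_minimal (array : List (Int × Int)) (h_ : Int) : Prop :=
  1 ≤ h_ ∨ array = []
instance (array : List (Int × Int)) (h_ : Int) : Decidable (Pre_ticks_minimal array h_) := by
  unfold Pre_ticks_minimal; infer_instance
def pvWitness_ticks_minimal : (List (Int × Int)) × Int := ([(3, 7), (5, 9)], 2)

def Spec_ticks_minimal (array : List (Int × Int)) (h_ : Int) (out : List Int) : Prop := out = ticks_minimal_alt array h_
instance (array : List (Int × Int)) (h_ : Int) (out : List Int) : Decidable (Spec_ticks_minimal array h_ out) := by unfold Spec_ticks_minimal; infer_instance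

-- ===== CLAIM (what is proved, stated in full; the proofs are below) =====
def Claim_equal_ticks_minimal : Prop := ∀ (array : List (Int × Int)) (h_ : Int), Dom_ticks_minimal array h_ → Pre_ticks_minimal array h_ → Spec_ticks_minimal array h_ (ticks_minimal array h_)

-- ===== LEMMAS AND PROOFS =====

-- proof-only helpers: A's flat loop is first reshaped into a segment recursion
-- (outerB/innerB), which is then identified with B's closed-form altLoop.
def innerB (h_ a0 a1 : Int) : Nat → List Int → Int → List Int × Int
  | 0, acc, i => (acc, i)
  | fuel+1, acc, i =>
    if h_ * i < a0 ∧ h_ * i < 500000 then innerB h_ a0 a1 fuel (acc ++ [a1]) (i+1)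
    else (acc, i)

def outerB (h_ : Int) : List (Int × Int) → List Int → Int → List Int
  | [], acc, _ => acc
  | (a0, a1) :: rest, acc, i =>
    let p := innerB h_ a0 a1 500001 acc i
    if 500000 ≤ h_ * p.2 then p.1
    else outerB h_ rest (p.1 ++ [a1]) (p.2 + 1)

lemma innerB_succ (h_ a0 a1 : Int) (fuel : Nat) (acc : List Int) (i : Int) :
    innerB h_ a0 a1 (fuel+1) acc i =
      if h_ * i < a0 ∧ h_ * i < 500000 then innerB h_ a0 a1 fuel (acc ++ [a1]) (i+1)
      else (acc, i) := rfl

lemma loopA_succ (array : List (Int × Int)) (h_ : Int) (fuel : Nat) (acc : List Int)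
    (i : Int) (k : Nat) :
    loopA array h_ (fuel+1) acc i k =
      if 500000 > h_ * i ∧ k < array.length then
        match array[k]? with
        | some p =>
          if h_ * i < p.1 then loopA array h_ fuel (acc ++ [p.2]) (i+1) k
          else loopA array h_ fuel (acc ++ [p.2]) (i+1) (k+1)
        | none => acc
      else acc := rfl

lemma outerB_cons (h_ a0 a1 : Int) (rest : List (Int × Int)) (acc : List Int) (i : Int) :
    outerB h_ ((a0, a1) :: rest) acc i =
      (if 500000 ≤ h_ * (innerB h_ a0 a1 500001 acc i).2
       then (innerB h_ a0 a1 500001 acc i).1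
       else outerB h_ rest ((innerB h_ a0 a1 500001 acc i).1 ++ [a1])
              ((innerB h_ a0 a1 500001 acc i).2 + 1)) := rfl

lemma le_hmul (h_ i : Int) (h1 : 1 ≤ h_) (h0 : 0 ≤ i) : i ≤ h_ * i := by nlinarith

-- B's inner while does nothing when its guard already fails
lemma innerB_noop (h_ a0 a1 : Int) (acc : List Int) (i : Int)
    (h : ¬ (h_ * i < a0 ∧ h_ * i < 500000)) :
    innerB h_ a0 a1 500001 acc i = (acc, i) := by
  rw [show (500001 : Nat) = 500000 + 1 from rfl, innerB_succ, if_neg h]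

-- once the cap is reached, the segment recursion returns the accumulator on any suffix
lemma outerB_capped (h_ : Int) (l : List (Int × Int)) (acc : List Int) (i : Int)
    (hge : (500000 : Int) ≤ h_ * i) :
    outerB h_ l acc i = acc := by
  cases l with
  | nil => rfl
  | cons q rest =>
    obtain ⟨a0, a1⟩ := q
    rw [outerB_cons, innerB_noop _ _ _ _ _ (by rintro ⟨-, h⟩; omega)]
    simp [hge]

-- innerB is fuel-stable once the fuel covers the remaining iterations
lemma innerB_stable (h_ a0 a1 : Int) (h1 : 1 ≤ h_) :
    ∀ (fuel : Nat) (i : Int) (acc : List Int), 0 ≤ i → (500000 : Int) ≤ i + fuel →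
      innerB h_ a0 a1 (fuel+1) acc i = innerB h_ a0 a1 fuel acc i := by
  intro fuel
  induction fuel with
  | zero =>
    intro i acc h0 hb
    have : ¬ (h_ * i < a0 ∧ h_ * i < 500000) := by
      rintro ⟨-, hlt⟩
      have := le_hmul h_ i h1 h0
      simp at hb; omega
    rw [show (0 : Nat) + 1 = 0 + 1 from rfl, innerB_succ, if_neg this]
    rfl
  | succ n ih =>
    intro i acc h0 hb
    conv_lhs => rw [innerB_succ]
    conv_rhs => rw [innerB_succ]
    split_ifs with hc
    · exact ih (i+1) (acc ++ [a1]) (by omega) (by push_cast at hb ⊢; omega)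
    · rfl

-- A's while loop equals the segment recursion on the remaining suffix
lemma loopA_eq_outerB (array : List (Int × Int)) (h_ : Int) (h1 : 1 ≤ h_) :
    ∀ (fuel : Nat) (k : Nat) (i : Int) (acc : List Int), 0 ≤ i → (500000 : Int) ≤ i + fuel →
      loopA array h_ fuel acc i k = outerB h_ (array.drop k) acc i := by
  intro fuel
  induction fuel with
  | zero =>
    intro k i acc h0 hb
    have hge : (500000 : Int) ≤ h_ * i := by
      have := le_hmul h_ i h1 h0
      simp at hb; omega
    show loopA array h_ 0 acc i k = _
    rw [outerB_capped _ _ _ _ hge]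
    rfl
  | succ n ih =>
    intro k i acc h0 hb
    rw [loopA_succ]
    by_cases hstop : (500000 : Int) ≤ h_ * i
    · rw [if_neg (by rintro ⟨h, -⟩; omega), outerB_capped _ _ _ _ hstop]
    · push_neg at hstop
      by_cases hk : k < array.length
      · have hget : array[k]? = some array[k] := List.getElem?_eq_getElem hk
        have hdk : array.drop k = array[k] :: array.drop (k+1) :=
          List.drop_eq_getElem_cons hk
        obtain ⟨a0, a1, hp⟩ : ∃ a0 a1, array[k] = (a0, a1) :=
          ⟨array[k].1, array[k].2, rfl⟩
        rw [hp] at hget hdk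
        rw [if_pos ⟨hstop, hk⟩, hget]
        by_cases hlt : h_ * i < a0
        · simp only
          rw [if_pos hlt]
          rw [ih k (i+1) (acc ++ [a1]) (by omega) (by push_cast at hb ⊢; omega)]
          rw [hdk]
          have hstep : innerB h_ a0 a1 500001 acc i
              = innerB h_ a0 a1 500001 (acc ++ [a1]) (i+1) := by
            have h5 : innerB h_ a0 a1 (500000+1) acc i
                = innerB h_ a0 a1 500000 (acc ++ [a1]) (i+1) := by
              rw [innerB_succ, if_pos ⟨hlt, hstop⟩]
            have h6 := innerB_stable h_ a0 a1 h1 500000 (i+1) (acc ++ [a1])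
              (by omega) (by push_cast; omega)
            rw [show (500001 : Nat) = 500000 + 1 from rfl, h5, h6]
          rw [outerB_cons, outerB_cons, hstep]
        · simp only
          rw [if_neg hlt]
          rw [ih (k+1) (i+1) (acc ++ [a1]) (by omega) (by push_cast at hb ⊢; omega)]
          rw [hdk, outerB_cons, innerB_noop _ _ _ _ _ (by rintro ⟨h, -⟩; exact hlt h)]
          rw [if_neg (by simpa using hstop)]
      · rw [if_neg (by rintro ⟨-, h⟩; exact hk h), List.drop_eq_nil_of_le (by omega)]
        rfl

-- h_*i < a0 iff i is below the ceiling -((-a0) // h_)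
lemma hmul_lt_iff_lt_ceil (h_ a0 : Int) (h1 : 1 ≤ h_) (i : Int) :
    h_ * i < a0 ↔ i < -(PySem.Int.floordiv (-a0) h_) := by
  obtain ⟨hb1, hb2⟩ :=
    (PySem.Int.neg_floordiv_neg_eq_iff_of_pos (a := a0) (b := h_)
      (q := -(PySem.Int.floordiv (-a0) h_)) (by omega)).mp rfl
  constructor
  · intro hlt
    by_contra hge
    push_neg at hge
    nlinarith
  · intro hlt
    nlinarith

-- closed form of the inner run: m is the first index failing the guard
lemma innerB_closed (h_ a0 a1 m : Int)
    (hm : ∀ j : Int, (h_ * j < a0 ∧ h_ * j < 500000) ↔ j < m) :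
    ∀ (fuel : Nat) (i : Int) (acc : List Int), (m - i).toNat ≤ fuel →
      innerB h_ a0 a1 fuel acc i = (acc ++ List.replicate (m - i).toNat a1, max i m) := by
  intro fuel
  induction fuel with
  | zero =>
    intro i acc hf
    have hmi : m ≤ i := by omega
    have h0' : (m - i).toNat = 0 := by omega
    simp [innerB, h0', max_eq_left hmi]
  | succ n ih =>
    intro i acc hf
    rw [innerB_succ]
    by_cases hg : i < m
    · rw [if_pos ((hm i).mpr hg), ih (i+1) (acc ++ [a1]) (by omega)]
      have h1 : (m - i).toNat = (m - (i+1)).toNat + 1 := by omega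
      have h2 : max (i+1) m = max i m := by omega
      rw [h1, h2, List.replicate_succ, List.append_assoc]
      rfl
    · rw [if_neg (fun hc => hg ((hm i).mp hc))]
      have : (m - i).toNat = 0 := by omega
      simp [this, max_eq_left (by omega : m ≤ i)]

lemma altLoop_capped (h_ limit : Int) (l : List (Int × Int)) (res : List Int) (i : Int)
    (hge : limit ≤ i) : altLoop h_ limit l res i = res := by
  cases l with
  | nil => rfl
  | cons q rest => obtain ⟨a0, a1⟩ := q; simp [altLoop, hge]

-- the segment recursion equals B's closed-form loop
lemma outerB_eq_alt (h_ : Int) (h1 : 1 ≤ h_) :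
    ∀ (l : List (Int × Int)) (res : List Int) (i : Int), 0 ≤ i →
      outerB h_ l res i = altLoop h_ (-(PySem.Int.floordiv (-(500000 : Int)) h_)) l res i := by
  have hlim : ∀ j : Int, h_ * j < 500000 ↔ j < -(PySem.Int.floordiv (-(500000 : Int)) h_) :=
    fun j => hmul_lt_iff_lt_ceil h_ 500000 h1 j
  set limit := -(PySem.Int.floordiv (-(500000 : Int)) h_) with hlimdef
  have hcap : ∀ j : Int, 500000 ≤ h_ * j ↔ limit ≤ j := fun j => by
    rw [← not_lt, ← not_lt]; exact not_congr (hlim j)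
  have hlim500 : limit ≤ 500000 := by
    by_contra hgt
    push_neg at hgt
    exact absurd ((hlim 500000).mpr hgt) (by simp only [not_lt]; nlinarith)
  intro l
  induction l with
  | nil => intro res i h0; rfl
  | cons q rest ih =>
    obtain ⟨a0, a1⟩ := q
    intro res i h0
    have hc := fun j => hmul_lt_iff_lt_ceil h_ a0 h1 j
    set c := -(PySem.Int.floordiv (-a0) h_) with hcdef
    have hm : ∀ j : Int, (h_ * j < a0 ∧ h_ * j < 500000) ↔ j < min c limit := by
      intro j; rw [hc j, hlim j, lt_min_iff]
    set m := min c limit with hmdef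
    have hmle : m ≤ limit := min_le_right _ _
    have hI := innerB_closed h_ a0 a1 m hm 500001 i res (by omega)
    have hI1 : (innerB h_ a0 a1 500001 res i).1 = res ++ List.replicate (m - i).toNat a1 := by
      rw [hI]
    have hI2 : (innerB h_ a0 a1 500001 res i).2 = max i m := by rw [hI]
    rw [outerB_cons, hI2, hI1]
    by_cases hil : limit ≤ i
    · rw [altLoop_capped _ _ _ _ _ hil, if_pos ((hcap _).mpr (by omega))]
      have h0' : (m - i).toNat = 0 := by omega
      simp [h0']
    · push_neg at hil
      rw [show altLoop h_ limit ((a0, a1) :: rest) res i =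
          (if limit ≤ i then res else
            altLoop h_ limit rest
              (res ++ List.replicate ((min (max i c) (limit - 1)) - i + 1).toNat a1)
              ((min (max i c) (limit - 1)) + 1)) from rfl,
        if_neg (show ¬ limit ≤ i from by omega)]
      by_cases hcl : limit ≤ c
      · -- segment reaches the cap: both return the capped run
        have hmeq : m = limit := min_eq_right hcl
        rw [if_pos (show (500000 : Int) ≤ h_ * max i m from (hcap (max i m)).mpr (by omega))]
        rw [show min (max i c) (limit - 1) = limit - 1 from min_eq_right (by omega),
          altLoop_capped _ _ _ _ _ (by omega),
          show (limit - 1 - i + 1).toNat = (m - i).toNat from by omega]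
      · push_neg at hcl
        have hmeq : m = c := min_eq_left (by omega)
        by_cases hci : c ≤ i
        · -- boundary step: one emission, advance to the next segment
          have h0' : (m - i).toNat = 0 := by omega
          have hmax : max i m = i := max_eq_left (by omega)
          rw [hmax, if_neg (show ¬ (500000 : Int) ≤ h_ * i from
              fun hx => absurd ((hcap i).mp hx) (by omega)), h0',
            show min (max i c) (limit - 1) = i from by omega,
            ih _ (i + 1) (by omega)]
          congr 1
          rw [show (i - i + 1).toNat = 1 from by omega]
          simp
        · push_neg at hci
          -- run inside the segment, then one boundary emission
          have hmax : max i m = c := by omega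
          rw [hmax, if_neg (show ¬ (500000 : Int) ≤ h_ * c from
              fun hx => absurd ((hcap c).mp hx) (by omega)),
            show min (max i c) (limit - 1) = c from by omega,
            ih _ (c + 1) (by omega)]
          congr 1
          rw [show (c - i + 1).toNat = (c - i).toNat + 1 from by omega,
            List.replicate_succ', hmeq, ← List.append_assoc]

-- ===== VERDICT (by name: the statement is the Claim_ definition above) =====
theorem ticks_minimal_spec : Claim_equal_ticks_minimal := by
  intro array h_ _ hpre
  unfold Spec_ticks_minimal ticks_minimal ticks_minimal_alt
  rcases hpre with h1 | hnil
  · cases array with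
    | nil =>
      rw [show (500001 : Nat) = 500000 + 1 from rfl, loopA_succ,
        if_neg (by rintro ⟨-, h⟩; simp at h)]
    | cons q rest =>
      rw [loopA_eq_outerB (q :: rest) h_ h1 500001 0 0 [] le_rfl (by norm_num)]
      exact outerB_eq_alt h_ h1 (q :: rest) [] 0 le_rfl
  · subst hnil
    rw [show (500001 : Nat) = 500000 + 1 from rfl, loopA_succ,
      if_neg (by rintro ⟨-, h⟩; simp at h)]
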